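-- pv_equiv track=rewrite | github.com/miguelrego25/PycharmProjects | Laboratórios de Algoritmia II 2021-2022/Torneio4/amigos/main.py | extensions
-- ===== SOURCE A (Python) =====
-- def extensions(pessoas, s, dic, impossiveis):
--     r = [pessoa for pessoa in pessoas if pessoa not in s and pessoa not in impossiveis]
--     errados = []
--     for i in range(len(r)):
--         for d in s:
--             if r[i] not in dic[d]:
--                 errados.append(r[i])
--                 break
--     for i in errados:
--         r.remove(i)
--     return r
-- ===== SOURCE B (Python) =====
-- def extensions(pessoas, s, dic, impossiveis):
--     banned = set(s) | set(impossiveis)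
--     survivors = [p for p in pessoas if p not in banned]
--     if not survivors or not s:
--         return survivors
--     common = set(dic[s[0]])
--     for d in s[1:]:
--         common &= set(dic[d])
--     return [p for p in survivors if p in common]
-- ===== Notes on version B (the rewrite author's own statement) =====
-- stated objective: simpler
-- what changed: B precomputes one banned set and one intersection set 'common' of all dic[d] and does a single ordered filter pass, instead of A's filter + per-candidate rescan of s building 'errados' + quadratic list.remove loop.
-- outside the precondition, e.g. on extensions([1], [10, 20], {10: []}, []): A returns [], B raises KeyError
import Mathlib
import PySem

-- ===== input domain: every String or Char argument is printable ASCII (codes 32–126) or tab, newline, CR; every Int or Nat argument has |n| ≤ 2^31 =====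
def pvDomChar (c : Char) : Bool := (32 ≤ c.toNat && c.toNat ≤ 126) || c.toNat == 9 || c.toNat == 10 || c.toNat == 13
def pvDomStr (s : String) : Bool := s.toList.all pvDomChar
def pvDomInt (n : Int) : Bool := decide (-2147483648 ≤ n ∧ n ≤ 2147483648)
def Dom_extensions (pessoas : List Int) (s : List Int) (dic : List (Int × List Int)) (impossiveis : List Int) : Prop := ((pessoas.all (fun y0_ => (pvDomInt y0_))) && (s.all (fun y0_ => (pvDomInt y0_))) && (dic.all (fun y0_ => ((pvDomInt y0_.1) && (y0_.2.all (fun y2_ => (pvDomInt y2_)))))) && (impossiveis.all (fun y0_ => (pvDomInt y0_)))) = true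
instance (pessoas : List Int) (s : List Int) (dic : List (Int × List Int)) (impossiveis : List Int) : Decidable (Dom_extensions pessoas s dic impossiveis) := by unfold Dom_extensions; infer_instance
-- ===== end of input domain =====

-- B replaces A's filter + per-candidate rescan of s + quadratic remove loop by one banned set,
-- one precomputed intersection set of the dic[d], and a single ordered filter pass (objective: simpler).

-- dic[d]; d is a key inside Pre_ where it is evaluated, so the [] default is never returned there
def dget (dic : List (Int × List Int)) (d : Int) : List Int :=
  PySem.Dict.getD (PySem.Dict.mk dic) d []

-- ===== PORT A =====
-- inner 'for d in s: if r[i] not in dic[d]: errados.append(r[i]); break'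
def extInner (dic : List (Int × List Int)) (x : Int) : List Int → List Int → List Int
  | [], errados => errados
  | d :: ds, errados =>
      if !(dget dic d).contains x then errados ++ [x]
      else extInner dic x ds errados

def extensions (pessoas : List Int) (s : List Int) (dic : List (Int × List Int)) (impossiveis : List Int) : List Int :=
  let r := pessoas.filter (fun p => !s.contains p && !impossiveis.contains p)
  let errados := (PySem.List.pyRange 0 r.length 1).foldl
      (fun errados i => extInner dic (PySem.List.pyGetD r i 0) s errados) []
  -- r.remove(i): each i ∈ errados is in r, so remove? never fails; getD r is the totalizing default
  errados.foldl (fun r e => (PySem.List.remove? r e).getD r) r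

-- ===== PORT B =====
def extensions_alt (pessoas : List Int) (s : List Int) (dic : List (Int × List Int)) (impossiveis : List Int) : List Int :=
  let banned := PySem.Set.union (PySem.Set.ofList s) impossiveis
  let survivors := pessoas.filter (fun p => !PySem.Set.contains banned p)
  if survivors.isEmpty || s.isEmpty then survivors
  else
    -- common = set(dic[s[0]]); for d in s[1:]: common &= set(dic[d])   (s[1:] = drop 1; s ≠ [] here)
    let common := (s.drop 1).foldl
        (fun c d => PySem.Set.inter c (PySem.Set.ofList (dget dic d)))
        (PySem.Set.ofList (dget dic (s.headD 0)))
    survivors.filter (fun p => PySem.Set.contains common p)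

-- ===== PRECONDITION & SPEC =====
-- Pre_ excludes inputs where some d in s is not a key of dic while a candidate survives the s/impossiveis
-- filter: Python A evaluates dic[d] there (raising KeyError unless an earlier d already broke every inner
-- loop) and Python B always raises KeyError there.
def Pre_extensions (pessoas : List Int) (s : List Int) (dic : List (Int × List Int)) (impossiveis : List Int) : Prop :=
  (∃ p ∈ pessoas, p ∉ s ∧ p ∉ impossiveis) → ∀ d ∈ s, d ∈ dic.map Prod.fst
instance (pessoas : List Int) (s : List Int) (dic : List (Int × List Int)) (impossiveis : List Int) : Decidable (Pre_extensions pessoas s dic impossiveis) := by unfold Pre_extensions; infer_instance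

def pvWitness_extensions : List Int × List Int × (List (Int × List Int)) × List Int :=
  ([1, 2, 3, 2], [4], [(4, [1, 3]), (5, [])], [3])

def Spec_extensions (pessoas : List Int) (s : List Int) (dic : List (Int × List Int)) (impossiveis : List Int) (out : List Int) : Prop := out = extensions_alt pessoas s dic impossiveis
instance (pessoas : List Int) (s : List Int) (dic : List (Int × List Int)) (impossiveis : List Int) (out : List Int) : Decidable (Spec_extensions pessoas s dic impossiveis out) := by unfold Spec_extensions; infer_instance

-- ===== CLAIM (what is proved, stated in full; the proofs are below) =====
def Claim_equal_extensions : Prop := ∀ (pessoas : List Int) (s : List Int) (dic : List (Int × List Int)) (impossiveis : List Int), Dom_extensions pessoas s dic impossiveis → Pre_extensions pessoas s dic impossiveis → Spec_extensions pessoas s dic impossiveis (extensions pessoas s dic impossiveis)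

-- ===== LEMMAS AND PROOFS =====

-- the inner loop appends x exactly when some d ∈ s rejects x
theorem extInner_eq (dic : List (Int × List Int)) (x : Int) (s errados : List Int) :
    extInner dic x s errados =
      if s.any (fun d => !(dget dic d).contains x) then errados ++ [x] else errados := by
  induction s with
  | nil => simp [extInner]
  | cons d ds ih =>
      simp only [extInner, ih, List.any_cons]
      by_cases h : x ∈ dget dic d <;> simp [h]

-- the errados index loop is a filter over r
theorem errados_eq (r s : List Int) (dic : List (Int × List Int)) :
    (PySem.List.pyRange 0 (r.length : Int) 1).foldl
        (fun errados i => extInner dic (PySem.List.pyGetD r i 0) s errados) [] =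
      r.filter (fun x => s.any (fun d => !(dget dic d).contains x)) := by
  rw [PySem.List.foldl_pyRange_zero_pyGetD' r 0 (fun errados x => extInner dic x s errados) []]
  simp only [extInner_eq]
  exact PySem.List.foldl_append_if_eq_filter _ _ _

-- pushing the remove-fold past a head that none of the removed elements equals
theorem foldl_remove_ne (x : Int) (r es : List Int) (h : ∀ e ∈ es, e ≠ x) :
    es.foldl (fun r e => ((PySem.List.remove? r e).getD r)) (x :: r) =
      x :: es.foldl (fun r e => ((PySem.List.remove? r e).getD r)) r := by
  induction es generalizing r with
  | nil => rfl
  | cons e es ih =>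
      have hex : x ≠ e := fun hx => (h e (by simp)) hx.symm
      have hstep : (PySem.List.remove? (x :: r) e).getD (x :: r) =
          x :: (PySem.List.remove? r e).getD r := by
        rw [PySem.List.remove?_cons_of_ne r hex]
        cases PySem.List.remove? r e <;> simp
      simp only [List.foldl_cons, hstep]
      exact ih _ (fun e' he' => h e' (by simp [he']))

-- removing the first occurrences of (r.filter q), in order, from r leaves r.filter (¬ q)
theorem foldl_remove_filter (q : Int → Bool) (r : List Int) :
    (r.filter q).foldl (fun r e => ((PySem.List.remove? r e).getD r)) r =
      r.filter (fun x => !q x) := by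
  induction r with
  | nil => rfl
  | cons x r ih =>
      by_cases h : q x
      · simpa [List.filter_cons, h, PySem.List.remove?_cons_self] using ih
      · simp only [List.filter_cons, h, if_neg, Bool.false_eq_true, not_false_iff,
          Bool.not_false, if_true]
        rw [foldl_remove_ne x r (r.filter q)
            (fun e he => fun hex => h (by simpa [hex] using (List.of_mem_filter he)))]
        rw [ih]

-- membership in the intersection accumulator
theorem mem_foldl_inter (p : Int) (l : List Int) (dic : List (Int × List Int)) (acc : PySem.Set Int) :
    (p ∈ l.foldl (fun c d => PySem.Set.inter c (PySem.Set.ofList (dget dic d))) acc) ↔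
      p ∈ acc ∧ ∀ d ∈ l, p ∈ dget dic d := by
  induction l generalizing acc with
  | nil => simp
  | cons d ds ih =>
      simp only [List.foldl_cons, ih, PySem.Set.mem_inter, PySem.Set.mem_ofList, List.mem_cons]
      constructor
      · rintro ⟨⟨h1, h2⟩, h3⟩
        exact ⟨h1, fun e he => he.elim (fun h => h ▸ h2) (h3 e)⟩
      · rintro ⟨h1, h2⟩
        exact ⟨⟨h1, h2 d (Or.inl rfl)⟩, fun e he => h2 e (Or.inr he)⟩

-- A is one filter: survivors of the s/impossiveis test that no d ∈ s rejects
theorem extensions_eq_filter (pessoas s : List Int) (dic : List (Int × List Int)) (impossiveis : List Int) :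
    extensions pessoas s dic impossiveis =
      (pessoas.filter (fun p => !s.contains p && !impossiveis.contains p)).filter
        (fun x => !s.any (fun d => !(dget dic d).contains x)) := by
  simp only [extensions]
  rw [errados_eq, foldl_remove_filter]

-- ===== VERDICT (by name: the statement is the Claim_ definition above) =====
theorem extensions_spec : Claim_equal_extensions := by
  intro pessoas s dic impossiveis _ _
  unfold Spec_extensions
  rw [extensions_eq_filter]
  simp only [extensions_alt]
  have hsurv : pessoas.filter
      (fun p => !PySem.Set.contains (PySem.Set.union (PySem.Set.ofList s) impossiveis) p) =
      pessoas.filter (fun p => !s.contains p && !impossiveis.contains p) := by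
    apply List.filter_congr
    intro p _
    rw [Bool.eq_iff_iff]
    simp [PySem.Set.mem_union, PySem.Set.mem_ofList]
  rw [hsurv]
  by_cases hempty : (pessoas.filter (fun p => !s.contains p && !impossiveis.contains p)).isEmpty
  · simp only [hempty, Bool.true_or, if_true]
    rw [List.isEmpty_iff] at hempty
    rw [hempty]
    simp
  · cases s with
    | nil => simp
    | cons s0 rest =>
        rw [if_neg (by simpa using hempty)]
        apply List.filter_congr
        intro p _
        simp only [List.headD_cons, List.drop_succ_cons, List.drop_zero]
        rw [Bool.eq_iff_iff, PySem.Set.contains_iff, mem_foldl_inter, PySem.Set.mem_ofList]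
        simp only [Bool.not_eq_true', List.any_eq_false, Bool.not_eq_false,
          List.contains_iff_mem, List.forall_mem_cons]
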